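-- pv_equiv track=rewrite | github.com/Garl4nd/Exercises | Stacks_Queues/sunset.py | get_sunset_builds_EW
-- ===== SOURCE A (Python) =====
-- def get_sunset_builds_EW(heights):
--     res=[]
--
--     max_h=0
--     for height in heights:
--         while res and height>res[-1]:
--
--             if height>res[-1]:
--                 res.pop()
--
--
--         res.append(height)
--
--     return res
-- ===== SOURCE B (Python) =====
-- def get_sunset_builds_EW(heights):
--     out = []
--     cur = None
--     for h in reversed(list(heights)):
--         if cur is None or h >= cur:
--             out.append(h)
--             cur = h
--     return out[::-1]
-- ===== Notes on version B (the rewrite author's own statement) =====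
-- stated objective: simpler
-- what changed: Replaced the monotonic stack with its pop-while loop by a single right-to-left pass keeping one scalar running maximum, including each element iff it is >= that max.
import Mathlib
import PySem

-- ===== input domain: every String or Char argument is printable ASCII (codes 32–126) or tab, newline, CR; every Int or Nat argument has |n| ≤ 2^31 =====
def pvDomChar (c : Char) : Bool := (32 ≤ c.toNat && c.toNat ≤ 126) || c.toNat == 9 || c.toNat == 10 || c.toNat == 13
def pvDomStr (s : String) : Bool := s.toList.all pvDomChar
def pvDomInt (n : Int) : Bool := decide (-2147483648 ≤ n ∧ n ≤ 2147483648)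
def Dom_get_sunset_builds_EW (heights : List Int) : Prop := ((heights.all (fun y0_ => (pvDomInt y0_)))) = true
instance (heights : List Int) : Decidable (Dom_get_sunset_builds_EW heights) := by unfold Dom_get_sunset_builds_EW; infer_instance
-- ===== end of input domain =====

-- B replaces A's monotonic stack and pop-while loop by one right-to-left pass
-- keeping a scalar running maximum (simpler decomposition, same asymptotic cost).


-- ===== PORT A =====
-- the Python `while res and height>res[-1]: res.pop()`; the stack is kept
-- head-first (head = Python res[-1]) and reversed once at the end.
def pvPopWhile (h : Int) : List Int → List Int
  | [] => []
  | t :: rest => if h > t then pvPopWhile h rest else t :: rest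

def get_sunset_builds_EW (heights : List Int) : List Int :=
  (heights.foldl (fun res height => height :: pvPopWhile height res) []).reverse

-- ===== PORT B =====
-- loop over reversed(heights) with `cur` the running maximum (None at start)
def pvGo : List Int → Option Int → List Int
  | [], _ => []
  | h :: t, none => h :: pvGo t (some h)
  | h :: t, some c => if h ≥ c then h :: pvGo t (some h) else pvGo t (some c)

def get_sunset_builds_EW_alt (heights : List Int) : List Int :=
  (pvGo heights.reverse none).reverse

-- ===== PRECONDITION & SPEC =====
def Spec_get_sunset_builds_EW (heights : List Int) (out : List Int) : Prop := out = get_sunset_builds_EW_alt heights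
instance (heights : List Int) (out : List Int) : Decidable (Spec_get_sunset_builds_EW heights out) := by unfold Spec_get_sunset_builds_EW; infer_instance

-- ===== CLAIM (what is proved, stated in full; the proofs are below) =====
def Claim_equal_get_sunset_builds_EW : Prop := ∀ (heights : List Int), Dom_get_sunset_builds_EW heights → Spec_get_sunset_builds_EW heights (get_sunset_builds_EW heights)

-- ===== LEMMAS AND PROOFS =====

-- popping with h from a B-style stack raises the running maximum to h
theorem pvPopWhile_pvGo_some (l : List Int) : ∀ (c h : Int), c ≤ h →
    pvPopWhile h (pvGo l (some c)) = pvGo l (some h) := by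
  induction l with
  | nil => intro c h _; simp [pvGo, pvPopWhile]
  | cons x t ih =>
    intro c h hch
    simp only [pvGo]
    by_cases hxc : x ≥ c
    · simp only [if_pos hxc, pvPopWhile]
      by_cases hhx : h > x
      · rw [if_pos hhx, ih x h (le_of_lt hhx)]
        rw [if_neg (by omega)]
      · rw [if_neg hhx, if_pos (by omega)]
    · rw [if_neg hxc, ih c h hch, if_neg (by omega)]

theorem pvPopWhile_pvGo_none (l : List Int) (h : Int) :
    pvPopWhile h (pvGo l none) = pvGo l (some h) := by
  cases l with
  | nil => simp [pvGo, pvPopWhile]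
  | cons x t =>
    simp only [pvGo, pvPopWhile]
    by_cases hhx : h > x
    · rw [if_pos hhx, pvPopWhile_pvGo_some t x h (le_of_lt hhx), if_neg (by omega)]
    · rw [if_neg hhx, if_pos (by omega)]

theorem foldl_eq_pvGo (heights : List Int) :
    heights.foldl (fun res height => height :: pvPopWhile height res) [] =
      pvGo heights.reverse none := by
  induction heights using List.reverseRecOn with
  | nil => simp [pvGo]
  | append_singleton ys h ih =>
    rw [List.foldl_append, List.foldl_cons, List.foldl_nil, ih,
      List.reverse_append]
    simp [pvGo, pvPopWhile_pvGo_none]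

-- ===== VERDICT (by name: the statement is the Claim_ definition above) =====
theorem get_sunset_builds_EW_spec : Claim_equal_get_sunset_builds_EW := by
  intro heights _
  unfold Spec_get_sunset_builds_EW get_sunset_builds_EW get_sunset_builds_EW_alt
  rw [foldl_eq_pvGo]
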